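-- pv_equiv track=rewrite | github.com/BernardoGR/ai_lab4 | lab4.py | enumerate_nodes
-- ===== SOURCE A (Python) =====
-- import itertools
--
-- def enumerate_nodes(nodes):
--     # generate a list of boolean combinations
--     combinations = list(map(list, itertools.product([0, 1], repeat=len(nodes))))
--     result_combinations = []
--     for combination in combinations:
--         new_combination = []
--         for index, value in enumerate(combination):
--             if value:
--                 sign = '+'
--             else:
--                 sign = '-'
--             # start from node index 1 to remove original sign
--             new_combination.append(sign + nodes[index][1:])
--         result_combinations.append(new_combination)
--     return result_combinations
-- ===== SOURCE B (Python) =====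
-- def enumerate_nodes(nodes):
--     # iterative doubling: walk the nodes back-to-front, prepending the '-'
--     # variant rows before the '+' variant rows so the first node varies slowest
--     rows = [[]]
--     for n in reversed(nodes):
--         lo = '-' + n[1:]
--         hi = '+' + n[1:]
--         rows = [[lo] + r for r in rows] + [[hi] + r for r in rows]
--     return rows
-- ===== Notes on version B (the rewrite author's own statement) =====
-- stated objective: alternative
-- what changed: B drops itertools.product and the 0/1 bit tuples entirely: it builds the result by iterative doubling, walking the nodes back-to-front and prepending each node's '-' variant rows before its '+' variant rows, so each node is sliced once and no indexed inner loop maps bits to signs.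
import Mathlib
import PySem

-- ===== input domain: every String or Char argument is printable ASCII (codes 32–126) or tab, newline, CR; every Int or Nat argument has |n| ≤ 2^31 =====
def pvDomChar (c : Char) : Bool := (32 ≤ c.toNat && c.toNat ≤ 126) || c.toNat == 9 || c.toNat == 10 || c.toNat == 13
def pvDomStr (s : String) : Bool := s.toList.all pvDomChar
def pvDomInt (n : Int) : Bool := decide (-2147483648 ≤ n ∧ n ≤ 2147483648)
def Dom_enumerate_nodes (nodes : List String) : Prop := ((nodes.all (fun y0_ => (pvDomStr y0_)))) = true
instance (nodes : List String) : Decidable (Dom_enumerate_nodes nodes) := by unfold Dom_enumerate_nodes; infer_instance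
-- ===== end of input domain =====

-- B drops itertools.product and the bit tuples: it builds the rows by iterative
-- doubling back-to-front, prepending each node's '-' rows before its '+' rows
-- (objective: alternative decomposition; each node is sliced once).


-- ===== PORT A =====
-- itertools.product([0, 1], repeat=n): first coordinate varies slowest
def pvBits : Nat → List (List Int)
  | 0 => [[]]
  | n + 1 => ([0, 1] : List Int).flatMap (fun b => (pvBits n).map (b :: ·))

-- the inner `for index, value in enumerate(combination)` loop of A
def pvRowA (nodes : List String) (combination : List Int) : List String :=
  (PySem.List.enumerate combination).foldl
    (fun acc p =>
      let sign : String := if p.2 ≠ 0 then "+" else "-"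
      acc ++ [sign ++ PySem.Str.slice ((PySem.List.pyGet? nodes p.1).getD "") (some 1) none])
    []

def enumerate_nodes (nodes : List String) : List (List String) :=
  let combinations := pvBits nodes.length
  combinations.foldl (fun acc c => acc ++ [pvRowA nodes c]) []

-- ===== PORT B =====
def enumerate_nodes_alt (nodes : List String) : List (List String) :=
  nodes.reverse.foldl
    (fun rows n =>
      let lo := "-" ++ PySem.Str.slice n (some 1) none
      let hi := "+" ++ PySem.Str.slice n (some 1) none
      rows.map (fun r => [lo] ++ r) ++ rows.map (fun r => [hi] ++ r))
    [[]]

-- ===== PRECONDITION & SPEC =====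
def Spec_enumerate_nodes (nodes : List String) (out : List (List String)) : Prop := out = enumerate_nodes_alt nodes
instance (nodes : List String) (out : List (List String)) : Decidable (Spec_enumerate_nodes nodes out) := by unfold Spec_enumerate_nodes; infer_instance

-- ===== CLAIM (what is proved, stated in full; the proofs are below) =====
def Claim_equal_enumerate_nodes : Prop := ∀ (nodes : List String), Dom_enumerate_nodes nodes → Spec_enumerate_nodes nodes (enumerate_nodes nodes)

-- ===== LEMMAS AND PROOFS =====

-- the value A appends for entry (index, value)
def pvCell (nodes : List String) (p : Int × Int) : String :=
  (if p.2 ≠ 0 then "+" else "-") ++ PySem.Str.slice ((PySem.List.pyGet? nodes p.1).getD "") (some 1) none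

def pvZipRow (c : List Int) (ns : List String) : List String :=
  List.zipWith (fun v n => (if v ≠ 0 then "+" else "-") ++ PySem.Str.slice n (some 1) none) c ns

theorem pvRowA_aux (nodes : List String) (c : List Int) : ∀ (k : Nat) (acc : List String),
    k + c.length ≤ nodes.length →
    (PySem.List.enumerate c (k : Int)).foldl (fun acc p => acc ++ [pvCell nodes p]) acc
      = acc ++ pvZipRow c (nodes.drop k) := by
  induction c with
  | nil => intro k acc _; simp [PySem.List.enumerate_nil, pvZipRow]
  | cons v c ih =>
    intro k acc h
    have hk : k < nodes.length := by simp at h; omega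
    rw [PySem.List.enumerate_cons]
    have hdrop : nodes.drop k = nodes[k] :: nodes.drop (k + 1) :=
      (List.getElem_cons_drop hk).symm
    have : ((k : Int) + 1) = ((k + 1 : Nat) : Int) := by push_cast; ring
    simp only [List.foldl_cons, this]
    rw [ih (k + 1) _ (by simp at h ⊢; omega), hdrop]
    have hcell : pvCell nodes ((k : Int), v)
        = (if v ≠ 0 then "+" else "-") ++ PySem.Str.slice nodes[k] (some 1) none := by
      simp [pvCell, PySem.List.pyGet?_natCast, List.getElem?_eq_getElem hk]
    simp only [pvZipRow, List.zipWith_cons_cons, hcell, List.append_assoc, List.singleton_append]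

set_option maxRecDepth 8192 in
theorem pvRowA_eq (nodes : List String) (c : List Int) (h : c.length ≤ nodes.length) :
    pvRowA nodes c = pvZipRow c nodes := by
  unfold pvRowA
  have := pvRowA_aux nodes c 0 [] (by omega)
  simp only [Nat.cast_zero, List.drop_zero, pvCell] at this
  exact this

theorem pvBits_length {n : Nat} {c : List Int} (hc : c ∈ pvBits n) : c.length = n := by
  induction n generalizing c with
  | zero => simp [pvBits] at hc; simp [hc]
  | succ n ih =>
    simp only [pvBits, List.mem_flatMap, List.mem_map] at hc
    obtain ⟨b, hb, c', hc', rfl⟩ := hc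
    simp [ih hc']

-- B's back-to-front doubling produces exactly A's bit rows, in product order
theorem pvAlt_eq (nodes : List String) :
    enumerate_nodes_alt nodes = (pvBits nodes.length).map (fun c => pvZipRow c nodes) := by
  unfold enumerate_nodes_alt
  rw [List.foldl_reverse]
  induction nodes with
  | nil => simp [pvBits, pvZipRow]
  | cons n ns ih =>
    simp only [List.foldr_cons, ih]
    simp only [List.length_cons, pvBits, List.flatMap_cons, List.flatMap_nil,
      List.map_append, List.map_map, List.append_nil]
    simp [pvZipRow, Function.comp_def]

-- ===== VERDICT (by name: the statement is the Claim_ definition above) =====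
theorem enumerate_nodes_spec : Claim_equal_enumerate_nodes := by
  intro nodes _
  unfold Spec_enumerate_nodes enumerate_nodes
  rw [PySem.List.foldl_append_singleton_eq_map]
  rw [List.map_congr_left (fun c hc => pvRowA_eq nodes c (le_of_eq (pvBits_length hc)))]
  exact (pvAlt_eq nodes).symm
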